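-- pv_equiv track=rewrite | github.com/RithvikKasarla/2019-Infinite-Loop-Practice | 2017_problems/prob6/main.py | pheonetic_alphabet
-- ===== SOURCE A (Python) =====
-- alphabet = ["Alpha", "Bravo", "Charlie", "Delta", "Echo", "Foxtrot", "Golf", "Hotel", "India", "Juliet", "Kilo", "Lima", "Mike", "November", "Oscar", "Papa", "Quebec", "Romeo", "Sierra", "Tango", "Uniform", "Victor", "Whiskey", "Xray", "Yankee", "Zulu"]
--
-- def pheonetic_alphabet(ipt):
--     final = []
--     for idx, i in enumerate(ipt):
--         if i == " ":
--             final.append(" ")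
--         else:
--             final.append(alphabet[ord(i.lower()) - 97])
--             try:
--                 if not ipt[idx + 1] == " ":
--                     final.append("-")
--             except:
--                 pass
--     return "".join(final)
-- ===== SOURCE B (Python) =====
-- alphabet = ["Alpha", "Bravo", "Charlie", "Delta", "Echo", "Foxtrot", "Golf", "Hotel", "India", "Juliet", "Kilo", "Lima", "Mike", "November", "Oscar", "Papa", "Quebec", "Romeo", "Sierra", "Tango", "Uniform", "Victor", "Whiskey", "Xray", "Yankee", "Zulu"]
--
-- def pheonetic_alphabet(ipt):
--     words = ipt.split(" ")
--     spelled = ["-".join(alphabet[ord(c.lower()) - 97] for c in w) for w in words]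
--     return " ".join(spelled)
-- ===== Notes on version B (the rewrite author's own statement) =====
-- stated objective: idiomatic
-- what changed: Replaces the index-with-lookahead loop and try/except by the idiomatic pipeline that splits the input on spaces, spells each word, joins the letters of a word with dashes and rejoins the words with spaces.
import Mathlib
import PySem

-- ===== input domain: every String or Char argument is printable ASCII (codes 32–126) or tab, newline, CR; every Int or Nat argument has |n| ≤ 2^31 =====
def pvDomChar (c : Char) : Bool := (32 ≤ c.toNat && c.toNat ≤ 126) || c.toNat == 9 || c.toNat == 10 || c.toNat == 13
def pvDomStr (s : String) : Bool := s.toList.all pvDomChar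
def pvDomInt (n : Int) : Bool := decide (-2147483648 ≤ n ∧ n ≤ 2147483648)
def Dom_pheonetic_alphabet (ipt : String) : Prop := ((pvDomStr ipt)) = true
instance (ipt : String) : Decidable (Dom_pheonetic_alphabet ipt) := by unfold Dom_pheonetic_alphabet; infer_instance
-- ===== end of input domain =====

-- B replaces A's index-with-lookahead loop and try/except by the idiomatic
-- split-on-space / spell-each-word / join pipeline; same O(n) cost, no speed claim.

-- the module-level constant 'alphabet' (shared by both Pythons)
def pvAlphabet : List String := ["Alpha", "Bravo", "Charlie", "Delta", "Echo", "Foxtrot", "Golf", "Hotel", "India", "Juliet", "Kilo", "Lima", "Mike", "November", "Oscar", "Papa", "Quebec", "Romeo", "Sierra", "Tango", "Uniform", "Victor", "Whiskey", "Xray", "Yankee", "Zulu"]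

-- ===== PORT A =====
-- A's loop over enumerate(ipt) with one-character lookahead and try/except: pass.
-- alphabet[ord(i.lower()) - 97] is inlined; under Pre_ the index is always in
-- Python range, so the .getD "" default is never produced.
def pheonetic_alphabet (ipt : String) : String :=
  let cs := ipt.toList
  let final : List String :=
    (PySem.List.enumerate cs 0).foldl (fun final p =>
      if p.2 = ' ' then final ++ [" "]
      else
        let final := final ++
          [(PySem.List.pyGet? pvAlphabet (((PySem.Chars.lowerChar p.2).toNat : Int) - 97)).getD ""]
        -- try: if not ipt[idx+1] == " ": append "-"  except: pass
        match PySem.List.pyGet? cs (p.1 + 1) with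
        | some c => if ¬ (c = ' ') then final ++ ["-"] else final
        | none => final) []
  PySem.Str.join "" final

-- ===== PORT B =====
-- alphabet[ord(c.lower()) - 97] as used by Source B's comprehension
def pvSpell (c : Char) : String :=
  (PySem.List.pyGet? pvAlphabet (((PySem.Chars.lowerChar c).toNat : Int) - 97)).getD ""

def pheonetic_alphabet_alt (ipt : String) : String :=
  let words := (PySem.Str.split? ipt " ").getD []   -- sep ≠ "", never none
  let spelled := words.map (fun w => PySem.Str.join "-" (w.toList.map pvSpell))
  PySem.Str.join " " spelled

-- ===== PRECONDITION & SPEC =====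
-- Pre_ admits exactly the inputs on which Python A returns: every character is a
-- space or has ord(c.lower())-97 in Python's valid index range [-26, 25] for the
-- 26-word list (letters, plus '[' '\' ']' '^' '_' '`' via negative indexing);
-- on any other character A raises IndexError.
def Pre_pheonetic_alphabet (ipt : String) : Prop :=
  (ipt.toList.all (fun c => c == ' ' ||
    (decide (71 ≤ (PySem.Chars.lowerChar c).toNat) && decide ((PySem.Chars.lowerChar c).toNat ≤ 122)))) = true
instance (ipt : String) : Decidable (Pre_pheonetic_alphabet ipt) := by unfold Pre_pheonetic_alphabet; infer_instance

def pvWitness_pheonetic_alphabet : String := "ab cd"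

def Spec_pheonetic_alphabet (ipt : String) (out : String) : Prop := out = pheonetic_alphabet_alt ipt
instance (ipt : String) (out : String) : Decidable (Spec_pheonetic_alphabet ipt out) := by unfold Spec_pheonetic_alphabet; infer_instance

-- ===== CLAIM (what is proved, stated in full; the proofs are below) =====
def Claim_equal_pheonetic_alphabet : Prop := ∀ (ipt : String), Dom_pheonetic_alphabet ipt → Pre_pheonetic_alphabet ipt → Spec_pheonetic_alphabet ipt (pheonetic_alphabet ipt)

-- ===== LEMMAS AND PROOFS =====

-- The list of strings A's loop appends, written as structural recursion with
-- one-character lookahead on the suffix.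
def pvF : List Char → List String
  | [] => []
  | c :: rest =>
      if c = ' ' then " " :: pvF rest
      else pvSpell c :: (match rest.head? with
        | some d => if d = ' ' then pvF rest else "-" :: pvF rest
        | none => pvF rest)

-- A's foldl over enumerate, started at offset k into cs, appends pvF (suffix).
theorem pvFoldA_eq (cs : List Char) :
    ∀ (s : List Char) (k : Nat) (acc : List String), cs.drop k = s →
    List.foldl (fun final p =>
      if p.2 = ' ' then final ++ [" "]
      else
        let final := final ++
          [(PySem.List.pyGet? pvAlphabet (((PySem.Chars.lowerChar p.2).toNat : Int) - 97)).getD ""]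
        match PySem.List.pyGet? cs (p.1 + 1) with
        | some c => if ¬ (c = ' ') then final ++ ["-"] else final
        | none => final) acc (PySem.List.enumerate s (k : Int))
    = acc ++ pvF s := by
  intro s
  induction s with
  | nil => intro k acc _; simp [PySem.List.enumerate_nil, pvF]
  | cons c rest ih =>
    intro k acc hdrop
    have hdrop' : cs.drop (k + 1) = rest := by
      have h := congrArg List.tail hdrop
      rw [List.tail_drop] at h
      exact h
    have hget : PySem.List.pyGet? cs ((k : Int) + 1) = rest.head? := by
      have h1 : ((k : Int) + 1) = ((k + 1 : Nat) : Int) := by push_cast; ring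
      rw [h1, PySem.List.pyGet?_natCast, ← List.head?_drop, hdrop']
    have IH : ∀ acc' : List String,
        List.foldl (fun final p =>
          if p.2 = ' ' then final ++ [" "]
          else
            let final := final ++
              [(PySem.List.pyGet? pvAlphabet (((PySem.Chars.lowerChar p.2).toNat : Int) - 97)).getD ""]
            match PySem.List.pyGet? cs (p.1 + 1) with
            | some c => if ¬ (c = ' ') then final ++ ["-"] else final
            | none => final) acc' (PySem.List.enumerate rest ((k : Int) + 1))
        = acc' ++ pvF rest := by
      intro acc'
      have h2 := ih (k + 1) acc' hdrop'
      have h1 : ((k : Int) + 1) = ((k + 1 : Nat) : Int) := by push_cast; ring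
      rw [h1]; exact h2
    rw [PySem.List.enumerate_cons, List.foldl_cons, IH]
    by_cases hc : c = ' '
    · simp [pvF, hc]
    · cases hhd : rest.head? with
      | none => simp [pvF, pvSpell, hget, hhd, hc]
      | some d =>
        by_cases hd : d = ' '
        · simp [pvF, pvSpell, hget, hhd, hc, hd]
        · simp [pvF, pvSpell, hget, hhd, hc, hd]

-- PySem's fueled splitOn on a one-character separator is List.splitOnP.
theorem pvGo_spec (s : Char) :
    ∀ (fuel : Nat) (l cur : List Char) (acc : List (List Char)), l.length ≤ fuel →
    PySem.Chars.splitOn.go [s] fuel l cur acc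
      = acc.reverse ++ List.modifyHead (cur.reverse ++ ·) (l.splitOnP (· == s)) := by
  intro fuel
  induction fuel with
  | zero =>
    intro l cur acc hl
    have hnil : l = [] := List.length_eq_zero_iff.mp (Nat.le_zero.mp hl)
    subst hnil
    simp [PySem.Chars.splitOn.go, List.splitOnP_nil]
  | succ n ih =>
    intro l cur acc hl
    cases l with
    | nil => simp [PySem.Chars.splitOn.go, List.splitOnP_nil]
    | cons c rest =>
      rw [PySem.Chars.splitOn.go]
      simp only [List.length_cons] at hl
      by_cases hc : c = s
      · have hpre : List.isPrefixOf [s] (c :: rest) = true := by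
          simp [List.isPrefixOf, hc]
        rw [if_pos hpre]
        rw [show List.drop [s].length (c :: rest) = rest by simp]
        rw [ih rest [] (cur.reverse :: acc) (by omega)]
        rw [List.splitOnP_cons, if_pos (by simp [hc])]
        cases hx : rest.splitOnP (· == s) <;> simp
      · have hpre : ¬ (List.isPrefixOf [s] (c :: rest) = true) := by
          simp [List.isPrefixOf]; exact fun h => (hc h.symm).elim
        rw [if_neg hpre]
        rw [ih rest (c :: cur) acc (by omega)]
        rw [List.splitOnP_cons, if_neg (by simp [hc])]
        congr 1
        cases h : rest.splitOnP (· == s) with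
        | nil => exact absurd h (List.splitOnP_ne_nil _ _)
        | cons w ws => simp

theorem pvSplitOn_single (cs : List Char) (s : Char) :
    PySem.Chars.splitOn cs [s] = cs.splitOnP (· == s) := by
  rw [PySem.Chars.splitOn, pvGo_spec s (cs.length + 1) cs [] [] (by omega)]
  cases h : cs.splitOnP (· == s) with
  | nil => exact absurd h (List.splitOnP_ne_nil _ _)
  | cons w ws => simp

theorem pvJoin_nil_cons (a : List Char) (l : List (List Char)) :
    PySem.Chars.join [] (a :: l) = a ++ PySem.Chars.join [] l := by
  cases l with
  | nil => simp [PySem.Chars.join_singleton, PySem.Chars.join_nil]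
  | cons q rest => rw [PySem.Chars.join_cons_cons]; simp

theorem pvJoin_append_head (sep a b : List Char) (l : List (List Char)) :
    PySem.Chars.join sep ((a ++ b) :: l) = a ++ PySem.Chars.join sep (b :: l) := by
  cases l with
  | nil => simp [PySem.Chars.join_singleton]
  | cons q rest => rw [PySem.Chars.join_cons_cons, PySem.Chars.join_cons_cons]; simp

-- Core: the concatenation of A's string list equals B's split/spell/join pipeline.
theorem pvCore (s : List Char) :
    PySem.Chars.join [] ((pvF s).map String.toList)
      = PySem.Chars.join [' ']
          ((s.splitOnP (· == ' ')).map (fun w => PySem.Chars.join ['-'] (w.map (fun c => (pvSpell c).toList)))) := by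
  induction s with
  | nil =>
    simp [pvF, List.splitOnP_nil, PySem.Chars.join_singleton, PySem.Chars.join_nil]
  | cons c rest ih =>
    by_cases hc : c = ' '
    · subst hc
      rw [List.splitOnP_cons, if_pos (by simp)]
      rw [show pvF (' ' :: rest) = " " :: pvF rest by simp [pvF], List.map_cons,
        show (" " : String).toList = [' '] from rfl, pvJoin_nil_cons, ih]
      cases h : rest.splitOnP (· == ' ') with
      | nil => exact absurd h (List.splitOnP_ne_nil _ _)
      | cons w ws =>
        simp only [List.map_cons]
        rw [PySem.Chars.join_cons_cons]
        simp [PySem.Chars.join_nil]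
    · rw [List.splitOnP_cons, if_neg (by simp [hc])]
      cases h : rest.splitOnP (· == ' ') with
      | nil => exact absurd h (List.splitOnP_ne_nil _ _)
      | cons w ws =>
        rw [h] at ih
        simp only [List.modifyHead_cons, List.map_cons]
        cases rest with
        | nil =>
          rw [List.splitOnP_nil] at h
          injection h with h1 h2
          subst h1; subst h2
          simp [show pvF [c] = [pvSpell c] by simp [pvF, hc],
            PySem.Chars.join_singleton]
        | cons d r' =>
          by_cases hd : d = ' '
          · subst hd
            have hw : w = [] := by
              rw [List.splitOnP_cons, if_pos (by simp)] at h
              injection h with h1 _; exact h1.symm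
            subst hw
            rw [show pvF (c :: ' ' :: r') = pvSpell c :: pvF (' ' :: r') by simp [pvF, hc],
              List.map_cons, pvJoin_nil_cons, ih]
            have key := pvJoin_append_head [' '] ((pvSpell c).toList) []
              (List.map (fun w => PySem.Chars.join ['-'] (List.map (fun c => (pvSpell c).toList) w)) ws)
            simp only [List.append_nil] at key
            rw [show PySem.Chars.join ['-'] ((pvSpell c).toList :: List.map (fun c => (pvSpell c).toList) ([] : List Char)) = (pvSpell c).toList by simp [PySem.Chars.join_singleton], key]
            simp [PySem.Chars.join_nil]
          · have hsplit' : ∃ w', w = d :: w' ∧ r'.splitOnP (· == ' ') = w' :: ws := by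
              rw [List.splitOnP_cons, if_neg (by simp [hd])] at h
              cases h' : r'.splitOnP (· == ' ') with
              | nil => exact absurd h' (List.splitOnP_ne_nil _ _)
              | cons w' ws' =>
                rw [h'] at h
                simp only [List.modifyHead_cons] at h
                injection h with h1 h2
                exact ⟨w', h1.symm, by rw [h2]⟩
            obtain ⟨w', hw1, _⟩ := hsplit'
            subst hw1
            rw [show pvF (c :: d :: r') = pvSpell c :: "-" :: pvF (d :: r') by simp [pvF, hc, hd],
              List.map_cons, List.map_cons, pvJoin_nil_cons, pvJoin_nil_cons, ih,
              show ("-" : String).toList = ['-'] from rfl]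
            rw [List.map_cons, List.map_cons, PySem.Chars.join_cons_cons]
            rw [pvJoin_append_head [' '] ((pvSpell c).toList ++ ['-'])
              (PySem.Chars.join ['-'] ((pvSpell d).toList :: List.map (fun c => (pvSpell c).toList) w'))
              (List.map (fun w => PySem.Chars.join ['-'] (List.map (fun c => (pvSpell c).toList) w)) ws)]
            simp [List.append_assoc]

-- ===== VERDICT (by name: the statement is the Claim_ definition above) =====
theorem pheonetic_alphabet_spec : Claim_equal_pheonetic_alphabet := by
  intro ipt _ _
  unfold Spec_pheonetic_alphabet pheonetic_alphabet pheonetic_alphabet_alt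
  show PySem.Str.join "" (List.foldl (fun final p =>
      if p.2 = ' ' then final ++ [" "]
      else
        let final := final ++
          [(PySem.List.pyGet? pvAlphabet (((PySem.Chars.lowerChar p.2).toNat : Int) - 97)).getD ""]
        match PySem.List.pyGet? ipt.toList (p.1 + 1) with
        | some c => if ¬ (c = ' ') then final ++ ["-"] else final
        | none => final) [] (PySem.List.enumerate ipt.toList 0))
    = PySem.Str.join " " (((PySem.Str.split? ipt " ").getD []).map (fun w => PySem.Str.join "-" (w.toList.map pvSpell)))
  have h0 := pvFoldA_eq ipt.toList ipt.toList 0 [] (by simp)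
  simp only [Nat.cast_zero] at h0
  rw [h0]
  -- identify B's word list with splitOnP on the character list
  have hsplit : Option.map (fun x => List.map String.toList x) (PySem.Str.split? ipt " ")
      = some (ipt.toList.splitOnP (· == ' ')) := by
    rw [PySem.Str.split?_map]
    rw [show (" " : String).toList = [' '] from rfl]
    rw [PySem.Chars.split?, if_neg (by simp), pvSplitOn_single]
  cases hws : PySem.Str.split? ipt " " with
  | none => rw [hws] at hsplit; simp at hsplit
  | some ws =>
    rw [hws] at hsplit
    simp only [Option.map_some, Option.some.injEq] at hsplit
    simp only [Option.getD_some, List.nil_append]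
    rw [PySem.Str.join, PySem.Str.join]
    congr 1
    rw [show ("" : String).toList = [] from rfl, show (" " : String).toList = [' '] from rfl]
    rw [pvCore, ← hsplit]
    simp only [List.map_map]
    congr 1
    refine List.map_congr_left fun w _ => ?_
    simp only [Function.comp_apply, PySem.Str.join]
    rw [show (("-" : String).toList) = ['-'] from rfl]
    rw [String.toList_ofList]
    simp [List.map_map]
    rfl
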